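-- pv_equiv track=rewrite | github.com/whckdgma96/algorithm_study | Algorithm/프로그래머스/그리디/큰_수_만들기.py | solution
-- ===== SOURCE A (Python) =====
-- def solution(number, k):
--     stack = []
--     for num in number:
--         while len(stack)>0 and k>0 and stack[-1] < num:
--             k -= 1
--             stack.pop()
--         stack.append(num)
--
--     if k !=0:
--         stack = stack[:-k]
--     return ''.join(stack)
-- ===== SOURCE B (Python) =====
-- def solution(number, k):
--     # Repeatedly delete one digit: the first digit smaller than its successor,
--     # or the last digit if the string is non-increasing.
--     s = list(number)
--     for _ in range(min(k, len(s))):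
--         for i in range(len(s) - 1):
--             if s[i] < s[i + 1]:
--                 del s[i]
--                 break
--         else:
--             s.pop()
--     return ''.join(s)
-- ===== Notes on version B (the rewrite author's own statement) =====
-- stated objective: alternative
-- what changed: Replaces A's one-pass monotonic stack with the classic 'delete one digit at a time' greedy: min(k, len) rounds, each removing the first digit that is smaller than its successor (or the last digit if none).
-- outside the precondition, e.g. on solution('52', -1): A returns '5', B returns '52'
import Mathlib
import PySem

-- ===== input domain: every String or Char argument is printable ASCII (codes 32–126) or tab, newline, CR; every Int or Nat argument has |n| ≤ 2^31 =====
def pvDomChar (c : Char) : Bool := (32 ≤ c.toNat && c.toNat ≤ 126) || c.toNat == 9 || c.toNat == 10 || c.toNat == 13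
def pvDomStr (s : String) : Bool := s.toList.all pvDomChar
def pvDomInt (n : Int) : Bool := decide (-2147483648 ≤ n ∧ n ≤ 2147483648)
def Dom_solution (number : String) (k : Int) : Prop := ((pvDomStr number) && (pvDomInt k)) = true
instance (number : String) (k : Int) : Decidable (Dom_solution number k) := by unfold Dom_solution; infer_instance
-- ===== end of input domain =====

-- B replaces A's monotonic stack with the classic "delete one digit per round" greedy
-- (first digit smaller than its successor, else the last digit), min(k, len) rounds;
-- objective: alternative (not faster).

-- ===== PORT A =====
-- the Python stack is kept reversed (head = stack[-1], Python's top); this is the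
-- inner `while` loop: pop while stack nonempty, k>0 and stack[-1] < num
def popLoopA : List Char → Int → Char → List Char × Int
  | [], k, _ => ([], k)
  | t :: rest, k, c => if 0 < k ∧ t < c then popLoopA rest (k - 1) c else (t :: rest, k)

-- one iteration of the `for num in number` loop: pop, then stack.append(num)
def stepA (s : List Char × Int) (c : Char) : List Char × Int :=
  let r := popLoopA s.1 s.2 c
  (c :: r.1, r.2)

-- `if k != 0: stack = stack[:-k]` then `''.join(stack)` (stack back in Python order)
def finishA (r : List Char × Int) : List Char :=
  if r.2 ≠ 0 then PySem.List.slice r.1.reverse none (some (-r.2)) else r.1.reverse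

def solution (number : String) (k : Int) : String :=
  String.mk (finishA (number.toList.foldl stepA ([], k)))

-- ===== PORT B =====
-- the inner `for i in range(len(s)-1) … else s.pop()` scan: delete the first digit
-- smaller than its successor, or the last digit if the list is non-increasing
def del1 : List Char → List Char
  | [] => []
  | [_] => []
  | a :: b :: t => if a < b then b :: t else a :: del1 (b :: t)

-- `for _ in range(min(k, len(s))): …` then join
def solution_alt (number : String) (k : Int) : String :=
  let s := number.toList
  String.mk (del1^[(min k (s.length : Int)).toNat] s)

-- ===== PRECONDITION & SPEC =====
-- Pre_ excludes negative k with -k < len(number), outside the task's natural domain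
-- (k counts digits to delete): there A's stack[:-k] slice accidentally returns the
-- prefix of length -k while B naturally deletes nothing and returns the whole string;
-- for the remaining negative k (-k ≥ len) both return the whole string, kept inside.
def Pre_solution (number : String) (k : Int) : Prop :=
  0 ≤ k ∨ (number.toList.length : Int) ≤ -k
instance (number : String) (k : Int) : Decidable (Pre_solution number k) := by
  unfold Pre_solution; infer_instance

def pvWitness_solution : String × Int := ("1924", 2)

def Spec_solution (number : String) (k : Int) (out : String) : Prop := out = solution_alt number k
instance (number : String) (k : Int) (out : String) : Decidable (Spec_solution number k out) := by
  unfold Spec_solution; infer_instance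

-- ===== CLAIM (what is proved, stated in full; the proofs are below) =====
def Claim_equal_solution : Prop := ∀ (number : String) (k : Int), Dom_solution number k → Pre_solution number k → Spec_solution number k (solution number k)

-- ===== LEMMAS AND PROOFS =====

-- "no ascent": no element is smaller than its successor
def noAsc : List Char → Prop
  | [] => True
  | [_] => True
  | a :: b :: t => ¬ a < b ∧ noAsc (b :: t)

lemma noAsc_cons_head : ∀ (c : Char) (l : List Char), noAsc (c :: l) →
    ∀ y, l.head? = some y → ¬ c < y := by
  intro c l h y hy
  cases l with
  | nil => simp at hy
  | cons z t =>
    simp only [List.head?_cons, Option.some.injEq] at hy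
    subst hy
    exact h.1

lemma noAsc_cons_tail : ∀ (c : Char) (l : List Char), noAsc (c :: l) → noAsc l := by
  intro c l h
  cases l with
  | nil => trivial
  | cons z t => exact h.2

lemma noAsc_append_singleton : ∀ (p : List Char) (a : Char), noAsc (p ++ [a]) → noAsc p
  | [], _, _ => trivial
  | [_], _, _ => trivial
  | _ :: y :: p', a, h => ⟨h.1, noAsc_append_singleton (y :: p') a h.2⟩

lemma noAsc_dropLast : ∀ (l : List Char), noAsc l → noAsc l.dropLast
  | [], _ => trivial
  | [_], _ => trivial
  | x :: y :: t, h => by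
    have ihr := noAsc_dropLast (y :: t) h.2
    cases t with
    | nil => trivial
    | cons z t' =>
      simp only [List.dropLast_cons₂] at ihr ⊢
      exact ⟨h.1, ihr⟩

-- with a non-positive budget the fold never pops
lemma foldl_stepA_le0 : ∀ (cs st : List Char) (k : Int), k ≤ 0 →
    List.foldl stepA (st, k) cs = (cs.reverse ++ st, k) := by
  intro cs
  induction cs with
  | nil => intro st k _; simp
  | cons c rest ih =>
    intro st k hk
    have hstep : stepA (st, k) c = (c :: st, k) := by
      cases st with
      | nil => simp [stepA, popLoopA]
      | cons t st' =>
        have hcond : ¬ (0 < k ∧ t < c) := fun hc => absurd hc.1 (by omega)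
        simp [stepA, popLoopA, hcond]
    rw [List.foldl_cons, hstep, ih (c :: st) k hk]
    simp

-- a non-increasing run on top of a compatible stack never pops
lemma foldl_stepA_noAsc : ∀ (cs st : List Char) (k : Int),
    noAsc cs → (∀ c t, cs.head? = some c → st.head? = some t → ¬ t < c) →
    List.foldl stepA (st, k) cs = (cs.reverse ++ st, k) := by
  intro cs
  induction cs with
  | nil => intro st k _ _; simp
  | cons c rest ih =>
    intro st k hna htop
    have hstep : stepA (st, k) c = (c :: st, k) := by
      cases st with
      | nil => simp [stepA, popLoopA]
      | cons t st' =>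
        have h1 : ¬ t < c := htop c t rfl rfl
        have hcond : ¬ (0 < k ∧ t < c) := fun hc => h1 hc.2
        simp [stepA, popLoopA, hcond]
    have htop' : ∀ c' t', rest.head? = some c' → (c :: st).head? = some t' → ¬ t' < c' := by
      intro c' t' h1 h2
      simp only [List.head?_cons, Option.some.injEq] at h2
      subst h2
      exact noAsc_cons_head c rest hna c' h1
    rw [List.foldl_cons, hstep, ih (c :: st) k (noAsc_cons_tail c rest hna) htop']
    simp

-- on a non-increasing list del1 drops the last element
lemma del1_noAsc : ∀ (l : List Char), noAsc l → del1 l = l.dropLast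
  | [], _ => by simp [del1]
  | [_], _ => by simp [del1]
  | x :: y :: t, h => by
    have := del1_noAsc (y :: t) h.2
    simp [del1, h.1, this]

-- iterating del1 on a non-increasing list takes a prefix
lemma iterate_del1_noAsc : ∀ (j : Nat) (cs : List Char), noAsc cs →
    del1^[j] cs = cs.take (cs.length - j) := by
  intro j
  induction j with
  | zero => intro cs _; simp
  | succ j ih =>
    intro cs hna
    rw [Function.iterate_succ_apply, del1_noAsc cs hna, ih _ (noAsc_dropLast cs hna),
      List.length_dropLast, List.dropLast_eq_take, List.take_take]
    congr 1
    omega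

-- every list is non-increasing or splits at its first ascent
lemma decomp (cs : List Char) :
    noAsc cs ∨ ∃ p a b t, cs = p ++ a :: b :: t ∧ a < b ∧ noAsc (p ++ [a]) := by
  induction cs with
  | nil => left; trivial
  | cons x rest ih =>
    cases rest with
    | nil => left; trivial
    | cons y t =>
      by_cases hxy : x < y
      · right; exact ⟨[], x, y, t, rfl, hxy, trivial⟩
      · rcases ih with hni | ⟨p, a, b, t', heq, hab, hch⟩
        · left; exact ⟨hxy, hni⟩
        · right
          refine ⟨x :: p, a, b, t', by rw [List.cons_append, heq], hab, ?_⟩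
          cases p with
          | nil =>
            simp only [List.nil_append, List.cons.injEq] at heq
            exact ⟨heq.1 ▸ hxy, trivial⟩
          | cons q p'' =>
            simp only [List.cons_append, List.cons.injEq] at heq
            exact ⟨heq.1 ▸ hxy, hch⟩

-- del1 removes exactly the first ascending digit
lemma del1_ascent : ∀ (p : List Char) (a b : Char) (t : List Char), a < b →
    noAsc (p ++ [a]) → del1 (p ++ a :: b :: t) = p ++ b :: t
  | [], a, b, t, hab, _ => by simp [del1, hab]
  | [x], a, b, t, hab, h => by simp [del1, h.1, hab]
  | x :: y :: p', a, b, t, hab, h => by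
    have ihr := del1_ascent (y :: p') a b t hab h.2
    simp only [List.cons_append] at ihr ⊢
    simp [del1, h.1, ihr]

-- one deletion round of A's fold equals one application of del1 at the first ascent
lemma foldl_split : ∀ (p : List Char) (a b : Char) (t : List Char) (k : Int),
    0 < k → a < b → noAsc (p ++ [a]) →
    List.foldl stepA ([], k) (p ++ a :: b :: t) =
      List.foldl stepA ([], k - 1) (p ++ b :: t) := by
  intro p a b t k hk hab hch
  have hassoc : p ++ a :: b :: t = (p ++ [a]) ++ b :: t := by simp
  rw [hassoc, List.foldl_append,
    foldl_stepA_noAsc (p ++ [a]) [] k hch (by intro c t' _ h; simp at h)]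
  rw [List.foldl_append,
    foldl_stepA_noAsc p [] (k - 1) (noAsc_append_singleton p a hch)
      (by intro c t' _ h; simp at h)]
  simp only [List.append_nil, List.reverse_append, List.reverse_singleton,
    List.singleton_append]
  rw [List.foldl_cons, List.foldl_cons]
  congr 1
  simp [stepA, popLoopA, hk, hab]

-- main invariant: A's whole computation equals min(k,len) rounds of del1
lemma mainA (m : Nat) : ∀ (cs : List Char),
    finishA (List.foldl stepA ([], (m : Int)) cs) = del1^[min m cs.length] cs := by
  induction m with
  | zero =>
    intro cs
    rw [show ((0 : Nat) : Int) = 0 from rfl, foldl_stepA_le0 cs [] 0 le_rfl]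
    simp [finishA]
  | succ m ih =>
    intro cs
    rcases decomp cs with hni | ⟨p, a, b, t, rfl, hab, hch⟩
    · rw [foldl_stepA_noAsc cs [] _ hni (by intro c t' _ h; simp at h)]
      have hne : ((m + 1 : Nat) : Int) ≠ 0 := by push_cast; omega
      rw [finishA]
      simp only [hne, List.append_nil, List.reverse_reverse, ne_eq,
        not_false_eq_true, if_true]
      rw [PySem.List.slice_to_neg_natCast cs (m + 1) (by omega)]
      rw [iterate_del1_noAsc _ _ hni]
      congr 1
      omega
    · have hsplit := foldl_split p a b t ((m + 1 : Nat) : Int) (by push_cast; omega) hab hch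
      have hcast : ((m + 1 : Nat) : Int) - 1 = (m : Int) := by push_cast; omega
      rw [hsplit, hcast, ih (p ++ b :: t)]
      have hdel : del1 (p ++ a :: b :: t) = p ++ b :: t := del1_ascent p a b t hab hch
      have hmin : min (m + 1) (p ++ a :: b :: t).length
          = min m (p ++ b :: t).length + 1 := by
        simp only [List.length_append, List.length_cons]
        omega
      rw [hmin, Function.iterate_succ_apply, hdel]

-- ===== VERDICT (by name: the statement is the Claim_ definition above) =====
theorem solution_spec : Claim_equal_solution := by
  intro number k _ hpre
  unfold Spec_solution solution solution_alt
  by_cases hk0 : 0 ≤ k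
  · have hk : k = ((k.toNat : Nat) : Int) := by omega
    rw [hk, mainA k.toNat number.toList]
    congr 2
    omega
  · -- negative k with -k ≥ len: A's slice keeps everything, B runs zero rounds
    have hlen : (number.toList.length : Int) ≤ -k := by
      rcases hpre with h | h
      · omega
      · exact h
    rw [foldl_stepA_le0 number.toList [] k (by omega)]
    have hiter : (min k ((number.toList.length : Nat) : Int)).toNat = 0 := by omega
    show String.mk (finishA (number.toList.reverse ++ [], k))
      = String.mk (del1^[(min k ((number.toList.length : Nat) : Int)).toNat] number.toList)
    rw [hiter, Function.iterate_zero_apply, finishA]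
    have hne : k ≠ 0 := by omega
    simp only [hne, List.append_nil, List.reverse_reverse, ne_eq,
      not_false_eq_true, if_true]
    rw [PySem.List.slice_to number.toList (show (0:Int) ≤ -k by omega)]
    rw [List.take_of_length_le (by omega)]
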